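-- pv_equiv track=rewrite | github.com/tommyvdv/psmqtt | psmqtt.py | _find_wildcard
-- ===== SOURCE A (Python) =====
-- def _find_wildcard(topic):
--     start = 0
--     # search for * or ** (but not *; or **;) outside of []
--     while start < len(topic):
--         wildcard_index = topic.find('*', start)
--         if wildcard_index < 0:
--             break
--         bracket_index = topic.find('[', start)
--         if 0 <= bracket_index < wildcard_index:
--             start = topic.find(']', bracket_index)
--             continue
--         wildcard_len = 1
--         if wildcard_index + 1 < len(topic) and topic[wildcard_index + 1] == '*':  # ** sequence
--             wildcard_len += 1
--         if wildcard_index + wildcard_len < len(topic) and topic[wildcard_index + wildcard_len] == ';':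
--             start = wildcard_index + wildcard_len
--             continue
--         return wildcard_index, wildcard_len
--     return -1, -1
-- ===== SOURCE B (Python) =====
-- def _find_wildcard(topic):
--     # single left-to-right scan with an in-bracket flag (linear time)
--     n = len(topic)
--     in_bracket = False
--     i = 0
--     while i < n:
--         c = topic[i]
--         if c == '[':
--             in_bracket = True
--         elif c == ']':
--             in_bracket = False
--         elif c == '*' and not in_bracket:
--             length = 2 if i + 1 < n and topic[i + 1] == '*' else 1
--             if not (i + length < n and topic[i + length] == ';'):
--                 return i, length
--         i += 1
--     return -1, -1
-- ===== Notes on version B (the rewrite author's own statement) =====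
-- stated objective: alternative
-- what changed: A repeatedly calls str.find for the wildcard and bracket characters and restarts the scan after each guarded wildcard or bracket, re-scanning for brackets every round; B makes one left-to-right pass over the characters with an in-bracket boolean flag.
-- intended difference: On topics ending in an asterisk whose final character lies inside a never-closed opening bracket (every other wildcard guarded by a following semicolon or itself inside such a bracket), A's search for the closing bracket yields -1, which wraps the next wildcard search to the last character, so A returns (len-1, 1); B returns (-1, -1), the intended value because a wildcard inside brackets is not a wildcard. — e.g. on _find_wildcard("[*"): A returns (1, 1), B returns (-1, -1)
import Mathlib
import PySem

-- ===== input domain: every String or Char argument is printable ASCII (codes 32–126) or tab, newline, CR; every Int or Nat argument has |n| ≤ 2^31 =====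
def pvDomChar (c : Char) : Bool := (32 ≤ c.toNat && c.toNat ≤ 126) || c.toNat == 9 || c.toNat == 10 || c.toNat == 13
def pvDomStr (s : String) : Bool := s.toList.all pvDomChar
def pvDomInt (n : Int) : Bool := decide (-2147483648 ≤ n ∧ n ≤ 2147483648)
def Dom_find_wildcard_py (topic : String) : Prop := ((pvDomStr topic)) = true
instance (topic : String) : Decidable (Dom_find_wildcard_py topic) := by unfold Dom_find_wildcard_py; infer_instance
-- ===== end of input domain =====

-- B replaces A's repeated find()-and-restart scanning by a single left-to-right pass with an
-- in-bracket flag; on the inputs described by D_ below (topic ends in a wildcard that sits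
-- inside a never-closed bracket) A and B intentionally differ.

-- ===== PORT A =====
-- the while loop of A: `start` is an Int exactly as in Python (find can set it to -1);
-- the fuel argument only bounds the iteration count (start strictly increases except for a
-- single excursion to -1, so length + 2 iterations always suffice) and makes the loop structural
def fwLoop (cs : List Char) : Int → Nat → Int × Int
  | _, 0 => (-1, -1)
  | start, fuel + 1 =>
    if start < (cs.length : Int) then
      let w := PySem.Chars.findFrom cs ['*'] start none
      if w < 0 then (-1, -1)
      else
        let b := PySem.Chars.findFrom cs ['['] start none
        if 0 ≤ b ∧ b < w then
          fwLoop cs (PySem.Chars.findFrom cs [']'] b none) fuel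
        else
          let L : Int := if w + 1 < (cs.length : Int) ∧ PySem.List.pyGet? cs (w + 1) = some '*' then 2 else 1
          if w + L < (cs.length : Int) ∧ PySem.List.pyGet? cs (w + L) = some ';' then
            fwLoop cs (w + L) fuel
          else (w, L)
    else (-1, -1)
def find_wildcard_py (topic : String) : Int × Int := fwLoop topic.toList 0 (topic.toList.length + 2)

-- ===== PORT B =====
-- one left-to-right pass; `i` is the current index, `inb` the in-bracket flag
def fwAltGo : List Char → Nat → Bool → Int × Int
  | [], _, _ => (-1, -1)
  | c :: rest, i, inb =>
    if c = '[' then fwAltGo rest (i + 1) true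
    else if c = ']' then fwAltGo rest (i + 1) false
    else if c = '*' && !inb then
      let L : Nat := if rest.head? = some '*' then 2 else 1
      if rest[L - 1]? = some ';' then fwAltGo rest (i + 1) inb
      else ((i : Int), (L : Int))
    else fwAltGo rest (i + 1) inb

def find_wildcard_py_alt (topic : String) : Int × Int := fwAltGo topic.toList 0 false

-- ===== PRECONDITION & SPEC =====
-- On topics ending in an asterisk whose final character lies inside a never-closed opening
-- bracket (every other wildcard guarded by a following semicolon or itself inside such a
-- bracket), A's search for the closing bracket yields -1, which wraps the next wildcard
-- search to the last character, so A returns (len-1, 1); B returns (-1, -1), the intended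
-- value because a wildcard inside brackets is not a wildcard.
def D_find_wildcard_py (topic : String) : Prop :=
  topic.toList.getLast? = some '*' ∧
  ∀ i < topic.toList.length, topic.toList[i]? = some '*' →
    topic.toList[i + 1]? = some ';' ∨ (topic.toList.drop i).take 3 = ['*', '*', ';'] ∨
    '[' ∈ (topic.toList.take i).reverse.takeWhile (· ≠ ']')
instance (topic : String) : Decidable (D_find_wildcard_py topic) := by
  unfold D_find_wildcard_py; infer_instance

def Spec_find_wildcard_py (topic : String) (out : Int × Int) : Prop :=
  ¬ D_find_wildcard_py topic → out = find_wildcard_py_alt topic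
instance (topic : String) (out : Int × Int) : Decidable (Spec_find_wildcard_py topic out) := by
  unfold Spec_find_wildcard_py; infer_instance

def pvDiffWitness_find_wildcard_py : String := "[*"
def pvDiffWitnessOut_find_wildcard_py : (Int × Int) × (Int × Int) := ((1, 1), (-1, -1))

-- ===== CLAIM (what is proved, stated in full; the proofs are below) =====
def Claim_unchanged_find_wildcard_py : Prop := ∀ (topic : String), Dom_find_wildcard_py topic → Spec_find_wildcard_py topic (find_wildcard_py topic)
def Claim_changed_find_wildcard_py : Prop := Dom_find_wildcard_py (pvDiffWitness_find_wildcard_py) ∧ D_find_wildcard_py (pvDiffWitness_find_wildcard_py) ∧ find_wildcard_py (pvDiffWitness_find_wildcard_py) = pvDiffWitnessOut_find_wildcard_py.1 ∧ find_wildcard_py_alt (pvDiffWitness_find_wildcard_py) = pvDiffWitnessOut_find_wildcard_py.2 ∧ pvDiffWitnessOut_find_wildcard_py.1 ≠ pvDiffWitnessOut_find_wildcard_py.2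
def Claim_exact_find_wildcard_py : Prop := ∀ (topic : String), Dom_find_wildcard_py topic → D_find_wildcard_py topic → find_wildcard_py topic ≠ find_wildcard_py_alt topic

-- ===== LEMMAS AND PROOFS =====

-- Python str.find facts used throughout the proofs
-- [c] is a prefix of l.drop j exactly when l[j]? = some c
theorem pvPfxSingle (l : List Char) (c : Char) (j : Nat) :
    [c] <+: l.drop j ↔ l[j]? = some c := by
  constructor
  · rintro ⟨t, ht⟩
    have : (l.drop j)[0]? = some c := by rw [← ht]; rfl
    simpa [List.getElem?_drop] using this
  · intro h
    have h0 : (l.drop j)[0]? = some c := by simpa [List.getElem?_drop] using h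
    rcases ld : l.drop j with _ | ⟨a, t⟩
    · simp [ld] at h0
    · simp [ld] at h0
      exact ⟨t, by simp [h0]⟩

-- packaged Python find(sub, start) spec for a single-character needle and 0 ≤ start ≤ len
theorem pvFfcInt (cs : List Char) (c : Char) (start : Int)
    (h0 : 0 ≤ start) (h1 : start ≤ (cs.length : Int)) :
    (PySem.Chars.findFrom cs [c] start none = -1 ∧
      ∀ i : Nat, start ≤ (i : Int) → cs[i]? ≠ some c) ∨
    (∃ j : Nat, PySem.Chars.findFrom cs [c] start none = (j : Int) ∧ start ≤ (j : Int) ∧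
      j < cs.length ∧ cs[j]? = some c ∧
      ∀ i : Nat, start ≤ (i : Int) → i < j → cs[i]? ≠ some c) := by
  set k : Nat := start.toNat with hk
  have hks : (k : Int) = start := Int.toNat_of_nonneg h0
  have hkl : k ≤ cs.length := by omega
  rw [← hks]
  by_cases hff : PySem.Chars.findFrom cs [c] (k : Int) none = -1
  · left
    refine ⟨hff, ?_⟩
    have hni : ¬ [c] <:+: cs.drop k := (PySem.Chars.findFrom_natCast_eq_neg_one_iff cs [c] k hkl).mp hff
    intro i hi hic
    apply hni
    have hpf : [c] <+: cs.drop i := (pvPfxSingle cs c i).mpr hic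
    have hik : k + (i - k) = i := by omega
    have : [c] <+: (cs.drop k).drop (i - k) := by
      rw [List.drop_drop, hik]; exact hpf
    exact this.isInfix.trans (List.drop_suffix _ _).isInfix
  · right
    obtain ⟨hle, hpf, hmin⟩ := PySem.Chars.findFrom_natCast_spec cs [c] k hkl hff
    refine ⟨(PySem.Chars.findFrom cs [c] (k : Int) none).toNat, ?_, ?_, ?_, ?_, ?_⟩
    · omega
    · omega
    · have := (pvPfxSingle cs c _).mp hpf
      exact (List.getElem?_eq_some_iff.mp this).1
    · exact (pvPfxSingle cs c _).mp hpf
    · intro i hi hilt hic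
      exact hmin i (by omega) hilt ((pvPfxSingle cs c i).mpr hic)

-- Python find with start = -1 searches from the last character
theorem pvFfNegOne (cs : List Char) (sub : List Char) (h : 1 ≤ cs.length) :
    PySem.Chars.findFrom cs sub (-1) none =
      PySem.Chars.findFrom cs sub ((cs.length - 1 : Nat) : Int) none := by
  have hst : ((cs.length - 1 : Nat) : Int) = -1 + (cs.length : Int) := by omega
  have h1 : ¬ (-1 + (cs.length : Int) < 0) := by omega
  simp only [PySem.Chars.findFrom, hst, if_pos (show (-1 : Int) < 0 by norm_num), if_neg h1]

-- at start = -1 a single-character find either fails or points at the last index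
theorem pvFfcNegOne (cs : List Char) (c : Char) (h : 1 ≤ cs.length) :
    PySem.Chars.findFrom cs [c] (-1) none = -1 ∨
    (PySem.Chars.findFrom cs [c] (-1) none = ((cs.length - 1 : Nat) : Int) ∧
      cs[cs.length - 1]? = some c) := by
  rw [pvFfNegOne cs [c] h]
  rcases pvFfcInt cs c ((cs.length - 1 : Nat) : Int) (by positivity) (by omega) with ⟨h1, _⟩ | ⟨j, hj1, hj2, hj3, hj4, _⟩
  · exact Or.inl h1
  · right
    have : j = cs.length - 1 := by omega
    subst this
    exact ⟨hj1, hj4⟩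



-- index i of cs lies inside a bracket: some '[' strictly before it with no ']' in between
def InBr (cs : List Char) (i : Nat) : Prop :=
  ∃ b < i, cs[b]? = some '[' ∧ ∀ k < i, b < k → cs[k]? ≠ some ']'

-- the wildcard starting at index i is silenced by a trailing ';'
def Guarded (cs : List Char) (i : Nat) : Prop :=
  cs[i + 1]? = some ';' ∨ (cs[i + 1]? = some '*' ∧ cs[i + 2]? = some ';')

-- the proof-side description of the change region, in the shape the loop invariant uses
def DLp (cs : List Char) : Prop :=
  cs ≠ [] ∧ cs[cs.length - 1]? = some '*' ∧ InBr cs (cs.length - 1) ∧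
  ∀ i < cs.length - 1, cs[i]? = some '*' → InBr cs i ∨ Guarded cs i

-- elements from the unclosed '[' onward survive takeWhile on the reverse
theorem pvTWmem (l : List Char) (b : Nat) (hg : l[b]? = some '[')
    (hno : ∀ k, b < k → k < l.length → l[k]? ≠ some ']') :
    '[' ∈ l.reverse.takeWhile (· ≠ ']') := by
  have hsplit : l.reverse = (l.drop b).reverse ++ (l.take b).reverse := by
    rw [← List.reverse_append, List.take_append_drop]
  have hall : (l.drop b).reverse.all (fun c => decide (c ≠ ']')) = true := by
    rw [List.all_eq_true]
    intro x hx
    rw [List.mem_reverse, List.mem_iff_getElem?] at hx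
    obtain ⟨j, hj⟩ := hx
    rw [List.getElem?_drop] at hj
    rcases Nat.eq_zero_or_pos j with hj0 | hj0
    · subst hj0
      rw [Nat.add_zero, hg] at hj
      have : x = '[' := (Option.some.inj hj).symm
      subst this
      decide
    · have hlen : b + j < l.length := (List.getElem?_eq_some_iff.mp hj).1
      have hne := hno (b + j) (by omega) hlen
      simp only [decide_eq_true_eq]
      intro hx'
      subst hx'
      exact hne hj
  have hts : (l.drop b).reverse.takeWhile (fun c => decide (c ≠ ']')) = (l.drop b).reverse :=
    List.takeWhile_eq_self_iff.mpr (List.all_eq_true.mp hall)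
  have htw : l.reverse.takeWhile (· ≠ ']') =
      (l.drop b).reverse ++ (l.take b).reverse.takeWhile (· ≠ ']') := by
    rw [hsplit, List.takeWhile_append, hts, if_pos rfl]
  rw [htw]
  apply List.mem_append_left
  rw [List.mem_reverse, List.mem_iff_getElem?]
  exact ⟨0, by rw [List.getElem?_drop, Nat.add_zero]; exact hg⟩

-- the '**;' guard, read off as a 3-slice
theorem pvTake3 (l : List Char) (i : Nat) (h0 : l[i]? = some '*')
    (h1 : l[i + 1]? = some '*') (h2 : l[i + 2]? = some ';') :
    (l.drop i).take 3 = ['*', '*', ';'] := by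
  have hn2 : i + 2 < l.length := (List.getElem?_eq_some_iff.mp h2).1
  have e0 : l.drop i = l[i]'(by omega) :: l.drop (i + 1) := List.drop_eq_getElem_cons (by omega)
  have e1 : l.drop (i + 1) = l[i + 1]'(by omega) :: l.drop (i + 2) := List.drop_eq_getElem_cons (by omega)
  have e2 : l.drop (i + 2) = l[i + 2]'hn2 :: l.drop (i + 3) := List.drop_eq_getElem_cons hn2
  have v0 : l[i]'(by omega) = '*' := by
    have := List.getElem?_eq_getElem (show i < l.length by omega)
    rw [h0] at this; exact (Option.some.inj this).symm
  have v1 : l[i + 1]'(by omega) = '*' := by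
    have := List.getElem?_eq_getElem (show i + 1 < l.length by omega)
    rw [h1] at this; exact (Option.some.inj this).symm
  have v2 : l[i + 2]'hn2 = ';' := by
    have := List.getElem?_eq_getElem hn2
    rw [h2] at this; exact (Option.some.inj this).symm
  rw [e0, e1, e2, v0, v1, v2]
  rfl

-- DLp implies the stated change region D_ (the direction the main proof needs)
theorem pvDLpD (l : List Char) (h : DLp l) :
    l.getLast? = some '*' ∧
    ∀ i < l.length, l[i]? = some '*' →
      l[i + 1]? = some ';' ∨ (l.drop i).take 3 = ['*', '*', ';'] ∨
      '[' ∈ (l.take i).reverse.takeWhile (· ≠ ']') := by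
  obtain ⟨hne, hlast, ⟨b, hb1, hb2, hb3⟩, hall⟩ := h
  have hn : 1 ≤ l.length := List.length_pos_iff.mpr hne
  refine ⟨by rw [List.getLast?_eq_getElem?]; exact hlast, ?_⟩
  intro i hi hstari
  have third : ∀ a, a < i → l[a]? = some '[' → (∀ k, a < k → k < i → l[k]? ≠ some ']') →
      '[' ∈ (l.take i).reverse.takeWhile (· ≠ ']') := by
    intro a ha hg hno
    apply pvTWmem (l.take i) a (by rw [List.getElem?_take_of_lt ha]; exact hg)
    intro k hk1 hk2
    have hk3 : k < i := by
      rw [List.length_take] at hk2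
      omega
    rw [List.getElem?_take_of_lt hk3]
    exact hno k hk1 hk3
  by_cases hilast : i = l.length - 1
  · subst hilast
    exact Or.inr (Or.inr (third b hb1 hb2 (fun k hk1 hk2 => hb3 k hk2 hk1)))
  · rcases hall i (by omega) hstari with ⟨a, ha1, ha2, ha3⟩ | hg
    · exact Or.inr (Or.inr (third a ha1 ha2 (fun k hk1 hk2 => ha3 k hk2 hk1)))
    · rcases hg with hg | ⟨hg1, hg2⟩
      · exact Or.inl hg
      · exact Or.inr (Or.inl (pvTake3 l i hstari hg1 hg2))

-- one step of B's scan, phrased through indices into the full list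
theorem pvAltStep (cs : List Char) (i : Nat) (inb : Bool) (h : i < cs.length) :
    fwAltGo (cs.drop i) i inb =
      if cs[i] = '[' then fwAltGo (cs.drop (i + 1)) (i + 1) true
      else if cs[i] = ']' then fwAltGo (cs.drop (i + 1)) (i + 1) false
      else if cs[i] = '*' && !inb then
        if cs[(i + 1) + ((if cs[i + 1]? = some '*' then 2 else 1) - 1)]? = some ';' then
          fwAltGo (cs.drop (i + 1)) (i + 1) inb
        else ((i : Int), ((if cs[i + 1]? = some '*' then 2 else 1 : Nat) : Int))
      else fwAltGo (cs.drop (i + 1)) (i + 1) inb := by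
  have hd : cs.drop i = cs[i] :: cs.drop (i + 1) := List.drop_eq_getElem_cons h
  rw [hd]
  have hh : (cs.drop (i + 1)).head? = cs[i + 1]? := by
    rw [List.head?_eq_getElem?, List.getElem?_drop]
  have hg : ∀ L : Nat, (cs.drop (i + 1))[L - 1]? = cs[(i + 1) + (L - 1)]? := by
    intro L; rw [List.getElem?_drop]
  simp only [fwAltGo, hh, hg]


theorem fwLoop_stop (cs : List Char) (start : Int) (f : Nat) (h : ¬ start < (cs.length : Int)) :
    fwLoop cs start (f + 1) = (-1, -1) := by
  simp only [fwLoop]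
  rw [if_neg h]

theorem fwLoop_step (cs : List Char) (start : Int) (f : Nat) (h : start < (cs.length : Int)) :
    fwLoop cs start (f + 1) =
      if PySem.Chars.findFrom cs ['*'] start none < 0 then (-1, -1)
      else if 0 ≤ PySem.Chars.findFrom cs ['['] start none ∧
          PySem.Chars.findFrom cs ['['] start none < PySem.Chars.findFrom cs ['*'] start none then
        fwLoop cs (PySem.Chars.findFrom cs [']'] (PySem.Chars.findFrom cs ['['] start none) none) f
      else if PySem.Chars.findFrom cs ['*'] start none +
            (if PySem.Chars.findFrom cs ['*'] start none + 1 < (cs.length : Int) ∧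
                PySem.List.pyGet? cs (PySem.Chars.findFrom cs ['*'] start none + 1) = some '*'
              then (2 : Int) else 1) < (cs.length : Int) ∧
          PySem.List.pyGet? cs (PySem.Chars.findFrom cs ['*'] start none +
            (if PySem.Chars.findFrom cs ['*'] start none + 1 < (cs.length : Int) ∧
                PySem.List.pyGet? cs (PySem.Chars.findFrom cs ['*'] start none + 1) = some '*'
              then (2 : Int) else 1)) = some ';' then
        fwLoop cs (PySem.Chars.findFrom cs ['*'] start none +
          (if PySem.Chars.findFrom cs ['*'] start none + 1 < (cs.length : Int) ∧
              PySem.List.pyGet? cs (PySem.Chars.findFrom cs ['*'] start none + 1) = some '*'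
            then (2 : Int) else 1)) f
      else (PySem.Chars.findFrom cs ['*'] start none,
        (if PySem.Chars.findFrom cs ['*'] start none + 1 < (cs.length : Int) ∧
            PySem.List.pyGet? cs (PySem.Chars.findFrom cs ['*'] start none + 1) = some '*'
          then (2 : Int) else 1)) := by
  simp only [fwLoop]
  rw [if_pos h]

-- B's scan passes over a stretch with no '*' and no '[' without changing anything
theorem pvWalkFalse (cs : List Char) :
    ∀ m i j, j - i ≤ m → i ≤ j → j ≤ cs.length →
      (∀ k, i ≤ k → k < j → cs[k]? ≠ some '*' ∧ cs[k]? ≠ some '[') →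
      fwAltGo (cs.drop i) i false = fwAltGo (cs.drop j) j false := by
  intro m
  induction m with
  | zero =>
    intro i j hm hij _ _
    have : i = j := by omega
    rw [this]
  | succ m ih =>
    intro i j hm hij hj hk
    by_cases hij' : i = j
    · rw [hij']
    · have hi : i < cs.length := by omega
      have hgi : cs[i]? = some cs[i] := List.getElem?_eq_getElem hi
      obtain ⟨hs, hb⟩ := hk i (le_refl i) (by omega)
      have hci1 : cs[i] ≠ '*' := by intro hc; rw [hc] at hgi; exact hs hgi
      have hci2 : cs[i] ≠ '[' := by intro hc; rw [hc] at hgi; exact hb hgi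
      rw [pvAltStep cs i false hi]
      rw [if_neg hci2]
      have hrest : fwAltGo (cs.drop (i + 1)) (i + 1) false = fwAltGo (cs.drop j) j false :=
        ih (i + 1) j (by omega) (by omega) hj (fun k hk1 hk2 => hk k (by omega) hk2)
      by_cases hcl : cs[i] = ']'
      · rw [if_pos hcl]; exact hrest
      · rw [if_neg hcl, if_neg (by simp [hci1])]
        exact hrest

-- with the flag set, B's scan runs to the closing ']' and clears the flag
theorem pvWalkTrue (cs : List Char) :
    ∀ m i r, r - i ≤ m → i ≤ r → cs[r]? = some ']' →
      (∀ k, i ≤ k → k < r → cs[k]? ≠ some ']') →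
      fwAltGo (cs.drop i) i true = fwAltGo (cs.drop (r + 1)) (r + 1) false := by
  intro m
  induction m with
  | zero =>
    intro i r hm hir hr _
    have : i = r := by omega
    subst this
    have hi : i < cs.length := (List.getElem?_eq_some_iff.mp hr).1
    rw [pvAltStep cs i true hi]
    have hci : cs[i] = ']' := by
      have := List.getElem?_eq_getElem hi
      rw [hr] at this; exact (Option.some.inj this).symm
    rw [if_neg (by rw [hci]; decide), if_pos hci]
  | succ m ih =>
    intro i r hm hir hr hk
    by_cases hir' : i = r
    · subst hir'
      have hi : i < cs.length := (List.getElem?_eq_some_iff.mp hr).1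
      rw [pvAltStep cs i true hi]
      have hci : cs[i] = ']' := by
        have := List.getElem?_eq_getElem hi
        rw [hr] at this; exact (Option.some.inj this).symm
      rw [if_neg (by rw [hci]; decide), if_pos hci]
    · have hi : i < cs.length := by
        have := (List.getElem?_eq_some_iff.mp hr).1; omega
      have hgi : cs[i]? = some cs[i] := List.getElem?_eq_getElem hi
      have hci : cs[i] ≠ ']' := by
        intro hc; rw [hc] at hgi; exact hk i (le_refl i) (by omega) hgi
      rw [pvAltStep cs i true hi]
      have hrest : fwAltGo (cs.drop (i + 1)) (i + 1) true = fwAltGo (cs.drop (r + 1)) (r + 1) false :=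
        ih (i + 1) r (by omega) (by omega) hr (fun k hk1 hk2 => hk k (by omega) hk2)
      by_cases hcb : cs[i] = '['
      · rw [if_pos hcb]; exact hrest
      · rw [if_neg hcb, if_neg hci, if_neg (by simp)]
        exact hrest

-- with no '*' ahead B's scan returns (-1, -1) whatever the flag does
theorem pvNoStar (cs : List Char) :
    ∀ m i inb, cs.length - i ≤ m →
      (∀ k, i ≤ k → k < cs.length → cs[k]? ≠ some '*') →
      fwAltGo (cs.drop i) i inb = (-1, -1) := by
  intro m
  induction m with
  | zero =>
    intro i inb hm _
    have : cs.drop i = [] := List.drop_eq_nil_of_le (by omega)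
    rw [this]; rfl
  | succ m ih =>
    intro i inb hm hk
    by_cases hi : i < cs.length
    · have hgi : cs[i]? = some cs[i] := List.getElem?_eq_getElem hi
      have hci : cs[i] ≠ '*' := by
        intro hc; rw [hc] at hgi; exact hk i (le_refl i) hi hgi
      rw [pvAltStep cs i inb hi]
      have h1 := ih (i + 1) true (by omega) (fun k hk1 hk2 => hk k (by omega) hk2)
      have h2 := ih (i + 1) false (by omega) (fun k hk1 hk2 => hk k (by omega) hk2)
      have h3 := ih (i + 1) inb (by omega) (fun k hk1 hk2 => hk k (by omega) hk2)
      split_ifs with hb hc hs <;> first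
        | exact h1 | exact h2 | exact h3
        | (exact absurd (by simpa using hs) (by simp [hci]))
    · have : cs.drop i = [] := List.drop_eq_nil_of_le (by omega)
      rw [this]; rfl

-- with the flag set and no ']' ahead B's scan returns (-1, -1)
theorem pvTrueNoClose (cs : List Char) :
    ∀ m i, cs.length - i ≤ m →
      (∀ k, i ≤ k → k < cs.length → cs[k]? ≠ some ']') →
      fwAltGo (cs.drop i) i true = (-1, -1) := by
  intro m
  induction m with
  | zero =>
    intro i hm _
    have : cs.drop i = [] := List.drop_eq_nil_of_le (by omega)
    rw [this]; rfl
  | succ m ih =>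
    intro i hm hk
    by_cases hi : i < cs.length
    · have hgi : cs[i]? = some cs[i] := List.getElem?_eq_getElem hi
      have hci : cs[i] ≠ ']' := by
        intro hc; rw [hc] at hgi; exact hk i (le_refl i) hi hgi
      rw [pvAltStep cs i true hi]
      have h1 := ih (i + 1) (by omega) (fun k hk1 hk2 => hk k (by omega) hk2)
      rw [if_neg hci]
      by_cases hcb : cs[i] = '['
      · rw [if_pos hcb]; exact h1
      · rw [if_neg hcb, if_neg (by simp)]
        exact h1
    · have : cs.drop i = [] := List.drop_eq_nil_of_le (by omega)
      rw [this]; rfl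

-- the scan sits at a live wildcard (no earlier '*' or '[' since `start`): both sides
-- either skip a ';'-guarded wildcard or return it
theorem pvStarCase (cs : List Char) (f : Nat)
    (ih : ∀ start, cs.length - start + 2 ≤ f → start ≤ cs.length →
      (∀ i, i < start → cs[i]? = some '*' → InBr cs i ∨ Guarded cs i) →
      fwLoop cs (start : Int) f = fwAltGo (cs.drop start) start false)
    (start jw : Nat) (hm : cs.length - start + 2 ≤ f + 1)
    (hinv : ∀ i, i < start → cs[i]? = some '*' → InBr cs i ∨ Guarded cs i)
    (hjw1 : start ≤ jw) (hjw2 : jw < cs.length) (hjw3 : cs[jw]? = some '*')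
    (hwmin : ∀ i : Nat, (start : Int) ≤ (i : Int) → i < jw → cs[i]? ≠ some '*')
    (hnobr : ∀ k : Nat, start ≤ k → k < jw → cs[k]? ≠ some '[') :
    (if (jw : Int) + (if (jw : Int) + 1 < (cs.length : Int) ∧ PySem.List.pyGet? cs ((jw : Int) + 1) = some '*' then (2 : Int) else 1) < (cs.length : Int) ∧
        PySem.List.pyGet? cs ((jw : Int) + (if (jw : Int) + 1 < (cs.length : Int) ∧ PySem.List.pyGet? cs ((jw : Int) + 1) = some '*' then (2 : Int) else 1)) = some ';' then
      fwLoop cs ((jw : Int) + (if (jw : Int) + 1 < (cs.length : Int) ∧ PySem.List.pyGet? cs ((jw : Int) + 1) = some '*' then (2 : Int) else 1)) f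
    else ((jw : Int), (if (jw : Int) + 1 < (cs.length : Int) ∧ PySem.List.pyGet? cs ((jw : Int) + 1) = some '*' then (2 : Int) else 1)))
    = fwAltGo (cs.drop start) start false := by
  have hc1 : PySem.List.pyGet? cs ((jw : Int) + 1) = cs[jw + 1]? := by
    rw [show ((jw : Int) + 1) = ((jw + 1 : Nat) : Int) by push_cast; ring, PySem.List.pyGet?_natCast]
  have hc2 : PySem.List.pyGet? cs ((jw : Int) + 2) = cs[jw + 2]? := by
    rw [show ((jw : Int) + 2) = ((jw + 2 : Nat) : Int) by push_cast; ring, PySem.List.pyGet?_natCast]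
  have hwalk : fwAltGo (cs.drop start) start false = fwAltGo (cs.drop jw) jw false :=
    pvWalkFalse cs jw start jw (by omega) hjw1 (le_of_lt hjw2)
      (fun k h1 h2 => ⟨hwmin k (by exact_mod_cast h1) h2, hnobr k h1 h2⟩)
  have hcjw : cs[jw] = '*' := by
    have := List.getElem?_eq_getElem hjw2
    rw [hjw3] at this; exact (Option.some.inj this).symm
  have hstep := pvAltStep cs jw false hjw2
  rw [if_neg (by rw [hcjw]; decide), if_neg (by rw [hcjw]; decide),
      if_pos (show (cs[jw] = '*' && !false) = true by rw [hcjw]; decide)] at hstep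
  by_cases hs2 : cs[jw + 1]? = some '*'
  · -- a ** wildcard
    have hn1 : jw + 1 < cs.length := (List.getElem?_eq_some_iff.mp hs2).1
    have hA2 : ((jw : Int) + 1 < (cs.length : Int) ∧ PySem.List.pyGet? cs ((jw : Int) + 1) = some '*') :=
      ⟨by exact_mod_cast hn1, by rw [hc1]; exact hs2⟩
    simp only [if_pos hA2]
    rw [if_pos hs2] at hstep
    rw [show jw + 1 + (2 - 1) = jw + 2 from rfl] at hstep
    by_cases hg2 : cs[jw + 2]? = some ';'
    · have hn2 : jw + 2 < cs.length := (List.getElem?_eq_some_iff.mp hg2).1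
      rw [if_pos (show ((jw : Int) + 2 < (cs.length : Int) ∧ PySem.List.pyGet? cs ((jw : Int) + 2) = some ';')
        from ⟨by exact_mod_cast hn2, by rw [hc2]; exact hg2⟩)]
      rw [if_pos hg2] at hstep
      have hIH : fwLoop cs ((jw + 2 : Nat) : Int) f = fwAltGo (cs.drop (jw + 2)) (jw + 2) false := by
        apply ih (jw + 2) (by omega) (by omega)
        intro i hi hstar
        by_cases hi1 : i < start
        · exact hinv i hi1 hstar
        · by_cases hi2 : i < jw
          · exact absurd hstar (hwmin i (by omega) hi2)
          · by_cases hi3 : i = jw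
            · subst hi3
              exact Or.inr (Or.inr ⟨hs2, hg2⟩)
            · have : i = jw + 1 := by omega
              subst this
              exact Or.inr (Or.inl (by rw [show jw + 1 + 1 = jw + 2 from rfl]; exact hg2))
      rw [show ((jw : Int) + 2) = ((jw + 2 : Nat) : Int) by push_cast; ring, hIH]
      -- B side: one more step over the second '*' (itself guarded by the ';')
      have hcj1 : cs[jw + 1]'hn1 = '*' := by
        have := List.getElem?_eq_getElem hn1
        rw [hs2] at this; exact (Option.some.inj this).symm
      have hstep2 := pvAltStep cs (jw + 1) false hn1
      rw [if_neg (by rw [hcj1]; decide), if_neg (by rw [hcj1]; decide),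
          if_pos (show (cs[jw + 1]'hn1 = '*' && !false) = true by rw [hcj1]; decide)] at hstep2
      rw [show jw + 1 + 1 = jw + 2 from rfl] at hstep2
      rw [if_neg (show ¬ cs[jw + 2]? = some '*' by rw [hg2]; simp)] at hstep2
      rw [show jw + 2 + (1 - 1) = jw + 2 from rfl] at hstep2
      rw [if_pos hg2] at hstep2
      rw [hwalk, hstep, hstep2]
    · rw [if_neg (show ¬ ((jw : Int) + 2 < (cs.length : Int) ∧ PySem.List.pyGet? cs ((jw : Int) + 2) = some ';') by
        rintro ⟨_, h2⟩; rw [hc2] at h2; exact hg2 h2)]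
      rw [if_neg hg2] at hstep
      rw [hwalk, hstep]
      norm_num
  · -- a single * wildcard
    have hA2 : ¬ ((jw : Int) + 1 < (cs.length : Int) ∧ PySem.List.pyGet? cs ((jw : Int) + 1) = some '*') := by
      rintro ⟨_, h2⟩; rw [hc1] at h2; exact hs2 h2
    simp only [if_neg hA2]
    rw [if_neg hs2] at hstep
    rw [show jw + 1 + (1 - 1) = jw + 1 from rfl] at hstep
    by_cases hg1 : cs[jw + 1]? = some ';'
    · have hn1 : jw + 1 < cs.length := (List.getElem?_eq_some_iff.mp hg1).1
      rw [if_pos (show ((jw : Int) + 1 < (cs.length : Int) ∧ PySem.List.pyGet? cs ((jw : Int) + 1) = some ';')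
        from ⟨by exact_mod_cast hn1, by rw [hc1]; exact hg1⟩)]
      rw [if_pos hg1] at hstep
      have hIH : fwLoop cs ((jw + 1 : Nat) : Int) f = fwAltGo (cs.drop (jw + 1)) (jw + 1) false := by
        apply ih (jw + 1) (by omega) (by omega)
        intro i hi hstar
        by_cases hi1 : i < start
        · exact hinv i hi1 hstar
        · by_cases hi2 : i < jw
          · exact absurd hstar (hwmin i (by omega) hi2)
          · have : i = jw := by omega
            subst this
            exact Or.inr (Or.inl hg1)
      rw [show ((jw : Int) + 1) = ((jw + 1 : Nat) : Int) by push_cast; ring, hIH]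
      rw [hwalk, hstep]
    · rw [if_neg (show ¬ ((jw : Int) + 1 < (cs.length : Int) ∧ PySem.List.pyGet? cs ((jw : Int) + 1) = some ';') by
        rintro ⟨_, h2⟩; rw [hc1] at h2; exact hg1 h2)]
      rw [if_neg hg1] at hstep
      rw [hwalk, hstep]
      norm_num

-- the scan sits before a '[' that precedes the next '*': A jumps to the matching ']'
-- (or to -1 and rescans the last character), B walks through the bracket with its flag
theorem pvBrCase (cs : List Char) (hnd : ¬ DLp cs) (f : Nat)
    (ih : ∀ start, cs.length - start + 2 ≤ f → start ≤ cs.length →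
      (∀ i, i < start → cs[i]? = some '*' → InBr cs i ∨ Guarded cs i) →
      fwLoop cs (start : Int) f = fwAltGo (cs.drop start) start false)
    (start jw jb : Nat) (hm : cs.length - start + 2 ≤ f + 1)
    (hinv : ∀ i, i < start → cs[i]? = some '*' → InBr cs i ∨ Guarded cs i)
    (hjw1 : start ≤ jw) (hjw2 : jw < cs.length) (_hjw3 : cs[jw]? = some '*')
    (hwmin : ∀ i : Nat, (start : Int) ≤ (i : Int) → i < jw → cs[i]? ≠ some '*')
    (hjb1 : start ≤ jb) (hjb3 : cs[jb]? = some '[') (hblt : jb < jw)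
    (hbmin : ∀ i : Nat, (start : Int) ≤ (i : Int) → i < jb → cs[i]? ≠ some '[') :
    fwLoop cs (PySem.Chars.findFrom cs [']'] ((jb : Nat) : Int) none) f =
      fwAltGo (cs.drop start) start false := by
  have hjb2 : jb < cs.length := by omega
  have hcjb : cs[jb] = '[' := by
    have := List.getElem?_eq_getElem hjb2
    rw [hjb3] at this; exact (Option.some.inj this).symm
  have hwalk : fwAltGo (cs.drop start) start false = fwAltGo (cs.drop jb) jb false :=
    pvWalkFalse cs jb start jb (by omega) hjb1 (by omega)
      (fun k h1 h2 => ⟨hwmin k (by exact_mod_cast h1) (by omega), hbmin k (by exact_mod_cast h1) h2⟩)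
  have hstepb := pvAltStep cs jb false hjb2
  rw [if_pos hcjb] at hstepb
  rcases pvFfcInt cs ']' (jb : Int) (by positivity) (by exact_mod_cast le_of_lt hjb2)
    with ⟨hr1, hrno⟩ | ⟨jr, hr1, hjr1, hjr2, hjr3, hrmin⟩
  · -- no closing ']' anywhere after jb
    rw [hr1]
    have hn1 : 1 ≤ cs.length := by omega
    have hrno' : ∀ k : Nat, jb ≤ k → cs[k]? ≠ some ']' :=
      fun k hk => hrno k (by exact_mod_cast hk)
    by_cases hlast : cs[cs.length - 1]? = some '*'
    · exfalso
      apply hnd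
      refine ⟨by intro h; rw [h] at hjb3; simp at hjb3, hlast,
        ⟨jb, by omega, hjb3, fun k hk1 hk2 => hrno' k (by omega)⟩, ?_⟩
      intro i hi hstar
      by_cases hi1 : i < start
      · exact hinv i hi1 hstar
      · by_cases hi2 : i < jw
        · exact absurd hstar (hwmin i (by exact_mod_cast (by omega : start ≤ i)) hi2)
        · exact Or.inl ⟨jb, by omega, hjb3, fun k hk1 hk2 => hrno' k (by omega)⟩
    · -- A rescans from the last character and finds nothing
      obtain ⟨f', rfl⟩ : ∃ f', f = f' + 1 := ⟨f - 1, by omega⟩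
      rw [fwLoop_step cs (-1) f' (by
        have : (0 : Int) ≤ (cs.length : Int) := by positivity
        omega)]
      rcases pvFfcNegOne cs '*' hn1 with hwn | ⟨_, hl2⟩
      · rw [hwn, if_pos (by norm_num)]
        rw [hwalk, hstepb]
        exact (pvTrueNoClose cs cs.length (jb + 1) (by omega)
          (fun k hk1 hk2 => hrno' k (by omega))).symm
      · exact absurd hl2 hlast
  · -- matched bracket: A restarts from the ']'
    have hjrb : jb < jr := by
      rcases Nat.lt_or_ge jb jr with h | h
      · exact h
      · exfalso
        have : jr = jb := by
          have : (jb : Int) ≤ (jr : Int) := hjr1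
          omega
        rw [this, hjb3] at hjr3
        simp at hjr3
    rw [hr1]
    have hIH : fwLoop cs ((jr : Nat) : Int) f = fwAltGo (cs.drop jr) jr false := by
      apply ih jr (by omega) (by omega)
      intro i hi hstar
      by_cases hi1 : i < start
      · exact hinv i hi1 hstar
      · by_cases hi2 : i < jw
        · exact absurd hstar (hwmin i (by exact_mod_cast (by omega : start ≤ i)) hi2)
        · exact Or.inl ⟨jb, by omega, hjb3,
            fun k hk1 hk2 => hrmin k (by exact_mod_cast (by omega : jb ≤ k)) (by omega)⟩
    rw [hIH]
    have hcjr : cs[jr] = ']' := by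
      have := List.getElem?_eq_getElem hjr2
      rw [hjr3] at this; exact (Option.some.inj this).symm
    have hwt : fwAltGo (cs.drop (jb + 1)) (jb + 1) true = fwAltGo (cs.drop (jr + 1)) (jr + 1) false :=
      pvWalkTrue cs jr (jb + 1) jr (by omega) (by omega) hjr3
        (fun k hk1 hk2 => hrmin k (by exact_mod_cast (by omega : jb ≤ k)) hk2)
    have hstepr := pvAltStep cs jr false hjr2
    rw [if_neg (by rw [hcjr]; decide), if_pos hcjr] at hstepr
    rw [hstepr, hwalk, hstepb, hwt]

-- A's loop body agrees with B's scan from any loop entry point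
theorem pvMain (cs : List Char) (hnd : ¬ DLp cs) :
    ∀ f start, cs.length - start + 2 ≤ f → start ≤ cs.length →
      (∀ i, i < start → cs[i]? = some '*' → InBr cs i ∨ Guarded cs i) →
      fwLoop cs (start : Int) f = fwAltGo (cs.drop start) start false := by
  intro f
  induction f with
  | zero =>
    intro start hm _ _
    exact absurd hm (by omega)
  | succ f ih =>
    intro start hm hsn hinv
    by_cases hstop : cs.length ≤ start
    · have hs : start = cs.length := by omega
      subst hs
      rw [fwLoop_stop cs _ f (lt_irrefl _), List.drop_length]
      rfl
    · have hlt : start < cs.length := by omega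
      rw [fwLoop_step cs (start : Int) f (by exact_mod_cast hlt)]
      rcases pvFfcInt cs '*' (start : Int) (by positivity) (by exact_mod_cast hsn)
        with ⟨hw1, hwno⟩ | ⟨jw, hw1, hjw1, hjw2, hjw3, hwmin⟩
      · rw [hw1, if_pos (by norm_num)]
        exact (pvNoStar cs cs.length start false (by omega)
          (fun k hk1 hk2 => hwno k (by exact_mod_cast hk1))).symm
      · rw [hw1, if_neg (by simp)]
        have hjw1' : start ≤ jw := by exact_mod_cast hjw1
        rcases pvFfcInt cs '[' (start : Int) (by positivity) (by exact_mod_cast hsn)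
          with ⟨hb1, hbno⟩ | ⟨jb, hb1, hjb1, hjb2, hjb3, hbmin⟩
        · rw [hb1, if_neg (by norm_num)]
          exact pvStarCase cs f ih start jw hm hinv hjw1' hjw2 hjw3 hwmin
            (fun k h1 h2 => hbno k (by exact_mod_cast h1))
        · rw [hb1]
          by_cases hblt : jb < jw
          · rw [if_pos ⟨by positivity, by exact_mod_cast hblt⟩]
            exact pvBrCase cs hnd f ih start jw jb hm hinv hjw1' hjw2 hjw3 hwmin
              (by exact_mod_cast hjb1) hjb3 hblt hbmin
          · rw [if_neg (by rintro ⟨_, h2⟩; exact hblt (by exact_mod_cast h2))]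
            apply pvStarCase cs f ih start jw hm hinv hjw1' hjw2 hjw3 hwmin
            intro k h1 h2
            exact hbmin k (by exact_mod_cast h1) (by omega)


-- ===== tightness: inside D_, A returns (len-1, 1) and B returns (-1, -1) =====

-- no '[' opened strictly before i stays open at i (B's flag would be false here)
def Inv2 (cs : List Char) (i : Nat) : Prop :=
  ∀ a < i, cs[a]? = some '[' → ∃ k, a < k ∧ k ≤ i ∧ cs[k]? = some ']'

-- a '*' with no '[' since start is not inside a bracket when Inv2 holds at start
theorem pvNotInBr (cs : List Char) (start j : Nat) (hinv : Inv2 cs start)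
    (hsj : start ≤ j) (hstar : cs[j]? = some '*')
    (hnob : ∀ k, start ≤ k → k < j → cs[k]? ≠ some '[') :
    ¬ InBr cs j := by
  rintro ⟨b, hb1, hb2, hb3⟩
  by_cases hbs : b < start
  · obtain ⟨k, hk1, hk2, hk3⟩ := hinv b hbs hb2
    by_cases hkj : k = j
    · rw [hkj] at hk3
      rw [hstar] at hk3
      simp at hk3
    · exact hb3 k (by omega) hk1 hk3
  · exact hnob b (by omega) hb1 hb2

-- membership in the reverse-takeWhile yields an unclosed '['
theorem pvTWConv (l : List Char)
    (h : '[' ∈ l.reverse.takeWhile (fun c => decide (c ≠ ']'))) :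
    ∃ b < l.length, l[b]? = some '[' ∧ ∀ k, b < k → k < l.length → l[k]? ≠ some ']' := by
  obtain ⟨j, hj⟩ := List.mem_iff_getElem?.mp h
  have hjt : j < (l.reverse.takeWhile (fun c => decide (c ≠ ']'))).length :=
    (List.getElem?_eq_some_iff.mp hj).1
  have hpre : (l.reverse.takeWhile (fun c => decide (c ≠ ']'))) <+: l.reverse :=
    List.takeWhile_prefix _
  have htl := hpre.length_le
  have hjl : j < l.length := by
    rw [List.length_reverse] at htl
    omega
  obtain ⟨u, hu⟩ := hpre
  have hrev : l.reverse[j]? = some '[' := by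
    rw [← hu, List.getElem?_append_left hjt]
    exact hj
  rw [List.getElem?_reverse (by simpa using hjl)] at hrev
  refine ⟨l.length - 1 - j, by omega, hrev, ?_⟩
  intro k hk1 hk2 hk3
  have h1 : l.reverse[l.length - 1 - k]? = some ']' := by
    rw [List.getElem?_reverse (by omega : l.length - 1 - k < l.length),
      show l.length - 1 - (l.length - 1 - k) = k by omega]
    exact hk3
  rw [← hu] at h1
  rw [List.getElem?_append_left (by omega)] at h1
  have h3 : (']' : Char) ∈ l.reverse.takeWhile (fun c => decide (c ≠ ']')) := by
    obtain ⟨hlt2, hEq⟩ := List.getElem?_eq_some_iff.mp h1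
    have := List.getElem_mem hlt2
    rwa [hEq] at this
  have := List.mem_takeWhile_imp h3
  simp at this

-- read the two guard characters back off the 3-slice
theorem pvTake3Conv (l : List Char) (i : Nat)
    (h : (l.drop i).take 3 = ['*', '*', ';']) :
    l[i + 1]? = some '*' ∧ l[i + 2]? = some ';' := by
  have h1 : ((l.drop i).take 3)[1]? = some '*' := by rw [h]; rfl
  have h2 : ((l.drop i).take 3)[2]? = some ';' := by rw [h]; rfl
  rw [List.getElem?_take_of_lt (by omega), List.getElem?_drop] at h1 h2
  exact ⟨h1, h2⟩

-- D_ implies the loop-invariant description of the change region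
theorem pvDDLp (l : List Char) (h1 : l.getLast? = some '*')
    (h2 : ∀ i < l.length, l[i]? = some '*' →
      l[i + 1]? = some ';' ∨ (l.drop i).take 3 = ['*', '*', ';'] ∨
      '[' ∈ (l.take i).reverse.takeWhile (· ≠ ']')) :
    DLp l := by
  rw [List.getLast?_eq_getElem?] at h1
  have hn : 1 ≤ l.length := by
    have := (List.getElem?_eq_some_iff.mp h1).1
    omega
  have hInBrOf : ∀ i, i ≤ l.length →
      '[' ∈ (l.take i).reverse.takeWhile (fun c => decide (c ≠ ']')) → InBr l i := by
    intro i hi hm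
    obtain ⟨b, hb1, hb2, hb3⟩ := pvTWConv (l.take i) hm
    rw [List.length_take] at hb1
    have hb1' : b < i := by omega
    rw [List.getElem?_take_of_lt hb1'] at hb2
    refine ⟨b, hb1', hb2, ?_⟩
    intro k hk1 hk2 hk3
    refine hb3 k hk2 (by rw [List.length_take]; omega) ?_
    rw [List.getElem?_take_of_lt hk1]
    exact hk3
  have hstar : ∀ i < l.length, l[i]? = some '*' → InBr l i ∨ Guarded l i := by
    intro i hi hs
    rcases h2 i hi hs with hg | hg | hg
    · exact Or.inr (Or.inl hg)
    · exact Or.inr (Or.inr (pvTake3Conv l i hg))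
    · exact Or.inl (hInBrOf i (by omega) hg)
  have hlast3 : InBr l (l.length - 1) := by
    rcases h2 (l.length - 1) (by omega) h1 with hg | hg | hg
    · have := (List.getElem?_eq_some_iff.mp hg).1
      omega
    · have := congrArg List.length hg
      simp [List.length_take] at this
      omega
    · exact hInBrOf (l.length - 1) (by omega) hg
  exact ⟨List.length_pos_iff.mp (by omega), h1, hlast3,
    fun i hi hs => hstar i (by omega) hs⟩

-- A's run inside the change region: from any loop entry not inside a bracket,
-- A ends at the -1 excursion and returns (len-1, 1)
theorem pvRunA (cs : List Char) (hd : DLp cs) :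
    ∀ f start, cs.length - start + 2 ≤ f → start < cs.length → Inv2 cs start →
      fwLoop cs (start : Int) f = (((cs.length - 1 : Nat) : Int), 1) := by
  obtain ⟨hne, hlast, hbr, hall⟩ := hd
  have hn : 1 ≤ cs.length := List.length_pos_iff.mpr hne
  intro f
  induction f with
  | zero =>
    intro start hm _ _
    exact absurd hm (by omega)
  | succ f ih =>
    intro start hm hlt hinv
    rw [fwLoop_step cs (start : Int) f (by exact_mod_cast hlt)]
    have hWstar : ∀ jw : Nat, start ≤ jw → jw < cs.length → cs[jw]? = some '*' →
        (∀ k, start ≤ k → k < jw → cs[k]? ≠ some '[') →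
        (if (jw : Int) + (if (jw : Int) + 1 < (cs.length : Int) ∧ PySem.List.pyGet? cs ((jw : Int) + 1) = some '*' then (2 : Int) else 1) < (cs.length : Int) ∧
            PySem.List.pyGet? cs ((jw : Int) + (if (jw : Int) + 1 < (cs.length : Int) ∧ PySem.List.pyGet? cs ((jw : Int) + 1) = some '*' then (2 : Int) else 1)) = some ';' then
          fwLoop cs ((jw : Int) + (if (jw : Int) + 1 < (cs.length : Int) ∧ PySem.List.pyGet? cs ((jw : Int) + 1) = some '*' then (2 : Int) else 1)) f
        else ((jw : Int), (if (jw : Int) + 1 < (cs.length : Int) ∧ PySem.List.pyGet? cs ((jw : Int) + 1) = some '*' then (2 : Int) else 1)))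
        = (((cs.length - 1 : Nat) : Int), 1) := by
      intro jw hjw1 hjw2 hjw3 hnob
      have hc1 : PySem.List.pyGet? cs ((jw : Int) + 1) = cs[jw + 1]? := by
        rw [show ((jw : Int) + 1) = ((jw + 1 : Nat) : Int) by push_cast; ring, PySem.List.pyGet?_natCast]
      have hc2 : PySem.List.pyGet? cs ((jw : Int) + 2) = cs[jw + 2]? := by
        rw [show ((jw : Int) + 2) = ((jw + 2 : Nat) : Int) by push_cast; ring, PySem.List.pyGet?_natCast]
      have hnin : ¬ InBr cs jw := pvNotInBr cs start jw hinv hjw1 hjw3 hnob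
      have hjwn : jw ≠ cs.length - 1 := by
        intro h
        rw [h] at hnin
        exact hnin hbr
      rcases hall jw (by omega) hjw3 with hIn | hg1 | ⟨hg1, hg2⟩
      · exact absurd hIn hnin
      · have hn1 : jw + 1 < cs.length := (List.getElem?_eq_some_iff.mp hg1).1
        have hA2 : ¬ ((jw : Int) + 1 < (cs.length : Int) ∧ PySem.List.pyGet? cs ((jw : Int) + 1) = some '*') := by
          rintro ⟨_, h⟩
          rw [hc1, hg1] at h
          simp at h
        simp only [if_neg hA2]
        rw [if_pos (show ((jw : Int) + 1 < (cs.length : Int) ∧ PySem.List.pyGet? cs ((jw : Int) + 1) = some ';')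
          from ⟨by exact_mod_cast hn1, by rw [hc1]; exact hg1⟩)]
        rw [show ((jw : Int) + 1) = ((jw + 1 : Nat) : Int) by push_cast; ring]
        apply ih (jw + 1) (by omega) (by omega)
        intro a ha hga
        by_cases ha1 : a < start
        · obtain ⟨k, hk1, hk2, hk3⟩ := hinv a ha1 hga
          exact ⟨k, hk1, by omega, hk3⟩
        · by_cases ha2 : a < jw
          · exact absurd hga (hnob a (by omega) ha2)
          · have : a = jw := by omega
            subst this
            rw [hjw3] at hga
            simp at hga
      · have hn2 : jw + 2 < cs.length := (List.getElem?_eq_some_iff.mp hg2).1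
        have hA2 : ((jw : Int) + 1 < (cs.length : Int) ∧ PySem.List.pyGet? cs ((jw : Int) + 1) = some '*') :=
          ⟨by omega, by rw [hc1]; exact hg1⟩
        simp only [if_pos hA2]
        rw [if_pos (show ((jw : Int) + 2 < (cs.length : Int) ∧ PySem.List.pyGet? cs ((jw : Int) + 2) = some ';')
          from ⟨by exact_mod_cast hn2, by rw [hc2]; exact hg2⟩)]
        rw [show ((jw : Int) + 2) = ((jw + 2 : Nat) : Int) by push_cast; ring]
        apply ih (jw + 2) (by omega) (by omega)
        intro a ha hga
        by_cases ha1 : a < start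
        · obtain ⟨k, hk1, hk2, hk3⟩ := hinv a ha1 hga
          exact ⟨k, hk1, by omega, hk3⟩
        · by_cases ha2 : a < jw
          · exact absurd hga (hnob a (by omega) ha2)
          · by_cases ha3 : a = jw
            · subst ha3
              rw [hjw3] at hga
              simp at hga
            · have : a = jw + 1 := by omega
              subst this
              rw [hg1] at hga
              simp at hga
    rcases pvFfcInt cs '*' (start : Int) (by positivity) (by exact_mod_cast le_of_lt hlt)
      with ⟨hw1, hwno⟩ | ⟨jw, hw1, hjw1, hjw2, hjw3, hwmin⟩
    · exact absurd hlast (hwno (cs.length - 1) (by omega))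
    · rw [hw1, if_neg (by simp)]
      have hjw1' : start ≤ jw := by exact_mod_cast hjw1
      rcases pvFfcInt cs '[' (start : Int) (by positivity) (by exact_mod_cast le_of_lt hlt)
        with ⟨hb1, hbno⟩ | ⟨jb, hb1, hjb1, hjb2, hjb3, hbmin⟩
      · rw [hb1, if_neg (by norm_num)]
        exact hWstar jw hjw1' hjw2 hjw3 (fun k hk1 hk2 => hbno k (by exact_mod_cast hk1))
      · rw [hb1]
        have hjb1' : start ≤ jb := by exact_mod_cast hjb1
        by_cases hblt : jb < jw
        · rw [if_pos ⟨by positivity, by exact_mod_cast hblt⟩]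
          rcases pvFfcInt cs ']' (jb : Int) (by positivity) (by exact_mod_cast le_of_lt hjb2)
            with ⟨hr1, hrno⟩ | ⟨jr, hr1, hjr1, hjr2, hjr3, hrmin⟩
          · -- the unclosed bracket: A restarts from -1 and picks up the final '*'
            rw [hr1]
            obtain ⟨f', rfl⟩ : ∃ f', f = f' + 1 := ⟨f - 1, by omega⟩
            rw [fwLoop_step cs (-1) f' (by
              have : (0 : Int) ≤ (cs.length : Int) := by positivity
              omega)]
            have hwv : PySem.Chars.findFrom cs ['*'] (-1) none = ((cs.length - 1 : Nat) : Int) := by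
              rw [pvFfNegOne cs ['*'] hn]
              rcases pvFfcInt cs '*' ((cs.length - 1 : Nat) : Int) (by positivity) (by omega)
                with ⟨h1, hno⟩ | ⟨j, hj1, hj2, hj3, hj4, _⟩
              · exact absurd hlast (hno (cs.length - 1) (by omega))
              · have : j = cs.length - 1 := by omega
                subst this
                exact hj1
            have hbv : ¬ (0 ≤ PySem.Chars.findFrom cs ['['] (-1) none ∧
                PySem.Chars.findFrom cs ['['] (-1) none < PySem.Chars.findFrom cs ['*'] (-1) none) := by
              rw [pvFfNegOne cs ['['] hn]
              rcases pvFfcInt cs '[' ((cs.length - 1 : Nat) : Int) (by positivity) (by omega)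
                with ⟨h1, _⟩ | ⟨j, hj1, hj2, hj3, hj4, _⟩
              · rw [h1]
                rintro ⟨h, _⟩
                omega
              · have : j = cs.length - 1 := by omega
                subst this
                rw [hlast] at hj4
                simp at hj4
            rw [hwv] at hbv ⊢
            rw [if_neg (show ¬ ((cs.length - 1 : Nat) : Int) < 0 by omega), if_neg hbv]
            have hA2 : ¬ (((cs.length - 1 : Nat) : Int) + 1 < (cs.length : Int) ∧
                PySem.List.pyGet? cs (((cs.length - 1 : Nat) : Int) + 1) = some '*') := by
              rintro ⟨h, _⟩
              omega
            simp only [if_neg hA2]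
            rw [if_neg (show ¬ (((cs.length - 1 : Nat) : Int) + 1 < (cs.length : Int) ∧
                PySem.List.pyGet? cs (((cs.length - 1 : Nat) : Int) + 1) = some ';') by
              rintro ⟨h, _⟩
              omega)]
          · -- matched bracket: restart from the ']'
            have hjrb : jb < jr := by
              rcases Nat.lt_or_ge jb jr with h | h
              · exact h
              · exfalso
                have : jr = jb := by
                  have : (jb : Int) ≤ (jr : Int) := hjr1
                  omega
                rw [this, hjb3] at hjr3
                simp at hjr3
            rw [hr1]
            apply ih jr (by omega) (by omega)
            intro a ha hga
            by_cases ha1 : a < start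
            · obtain ⟨k, hk1, hk2, hk3⟩ := hinv a ha1 hga
              exact ⟨k, hk1, by omega, hk3⟩
            · by_cases ha2 : a < jb
              · exact absurd hga (hbmin a (by exact_mod_cast (by omega : start ≤ a)) ha2)
              · exact ⟨jr, by omega, le_refl jr, hjr3⟩
        · rw [if_neg (by rintro ⟨_, h2⟩; exact hblt (by exact_mod_cast h2))]
          exact hWstar jw hjw1' hjw2 hjw3
            (fun k hk1 hk2 => hbmin k (by exact_mod_cast hk1) (by omega))

-- B's run inside the change region: the scan never reports a wildcard
theorem pvRunB (cs : List Char) (hd : DLp cs) :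
    ∀ m i inb, cs.length - i ≤ m → i ≤ cs.length →
      (inb = false → Inv2 cs i) →
      (inb = true → ∃ a < i, cs[a]? = some '[' ∧ ∀ k, a < k → k < i → cs[k]? ≠ some ']') →
      fwAltGo (cs.drop i) i inb = (-1, -1) := by
  obtain ⟨hne, hlast, hbr, hall⟩ := hd
  intro m
  induction m with
  | zero =>
    intro i inb hm _ _ _
    have : cs.drop i = [] := List.drop_eq_nil_of_le (by omega)
    rw [this]
    rfl
  | succ m ih =>
    intro i inb hm hin hf ht
    by_cases hi : i < cs.length
    · have hgi : cs[i]? = some cs[i] := List.getElem?_eq_getElem hi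
      rw [pvAltStep cs i inb hi]
      by_cases hcb : cs[i] = '['
      · rw [if_pos hcb]
        apply ih (i + 1) true (by omega) (by omega) (fun h => by simp at h)
        intro _
        refine ⟨i, by omega, by rw [← hcb]; exact hgi, ?_⟩
        intro k hk1 hk2
        exact absurd hk1 (by omega)
      · rw [if_neg hcb]
        by_cases hcr : cs[i] = ']'
        · rw [if_pos hcr]
          apply ih (i + 1) false (by omega) (by omega) ?_ (fun h => by simp at h)
          intro _ a ha hga
          by_cases hai : a = i
          · subst hai
            rw [hgi] at hga
            exact absurd ((Option.some.inj hga).symm.trans hcr).symm (by decide)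
          · exact ⟨i, by omega, by omega, by rw [← hcr]; exact hgi⟩
        · rw [if_neg hcr]
          by_cases hstar : (cs[i] = '*' && !inb) = true
          · rw [if_pos hstar]
            have hsp : cs[i] = '*' ∧ inb = false := by
              simpa using hstar
            have hinv := hf hsp.2
            have hstar? : cs[i]? = some '*' := by rw [← hsp.1]; exact hgi
            have hnin : ¬ InBr cs i :=
              pvNotInBr cs i i hinv (le_refl i) hstar? (fun k hk1 hk2 => by omega)
            have hiln : i ≠ cs.length - 1 := by
              intro h
              rw [h] at hnin
              exact hnin hbr
            have hnext : Inv2 cs (i + 1) := by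
              intro a ha hga
              by_cases ha1 : a < i
              · obtain ⟨k, hk1, hk2, hk3⟩ := hinv a ha1 hga
                exact ⟨k, hk1, by omega, hk3⟩
              · have : a = i := by omega
                subst this
                rw [hstar?] at hga
                simp at hga
            rcases hall i (by omega) hstar? with hIn | hg1 | ⟨hg1, hg2⟩
            · exact absurd hIn hnin
            · have hL : ¬ cs[i + 1]? = some '*' := by
                rw [hg1]
                simp
              rw [if_neg hL]
              rw [show i + 1 + (1 - 1) = i + 1 from rfl]
              rw [if_pos hg1]
              exact ih (i + 1) inb (by omega) (by omega) (fun _ => hnext)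
                (fun h => by rw [hsp.2] at h; simp at h)
            · rw [if_pos hg1]
              rw [show i + 1 + (2 - 1) = i + 2 from rfl]
              rw [if_pos hg2]
              exact ih (i + 1) inb (by omega) (by omega) (fun _ => hnext)
                (fun h => by rw [hsp.2] at h; simp at h)
          · rw [if_neg hstar]
            apply ih (i + 1) inb (by omega) (by omega)
            · intro h
              have hinv := hf h
              intro a ha hga
              by_cases ha1 : a < i
              · obtain ⟨k, hk1, hk2, hk3⟩ := hinv a ha1 hga
                exact ⟨k, hk1, by omega, hk3⟩
              · have : a = i := by omega
                subst this
                rw [hgi] at hga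
                exact absurd (Option.some.inj hga) hcb
            · intro h
              obtain ⟨a, ha, hag, hak⟩ := ht h
              refine ⟨a, by omega, hag, ?_⟩
              intro k hk1 hk2 hk3
              by_cases hki : k = i
              · subst hki
                rw [hgi] at hk3
                exact hcr (Option.some.inj hk3)
              · exact hak k hk1 (by omega) hk3
    · have : cs.drop i = [] := List.drop_eq_nil_of_le (by omega)
      rw [this]
      rfl

-- ===== VERDICT (by name: the statements are the Claim_ definitions above) =====
theorem find_wildcard_py_spec : Claim_unchanged_find_wildcard_py := by
  intro topic _hdom hnd
  have hnd' : ¬ DLp topic.toList := fun hd => hnd (by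
    unfold D_find_wildcard_py
    exact pvDLpD topic.toList hd)
  have h := pvMain topic.toList hnd' (topic.toList.length + 2) 0 (by omega) (by omega)
    (fun i hi _ => absurd hi (by omega))
  unfold find_wildcard_py find_wildcard_py_alt
  simpa using h

theorem find_wildcard_py_changed : Claim_changed_find_wildcard_py := by
  unfold Claim_changed_find_wildcard_py
  decide

theorem find_wildcard_py_tight : Claim_exact_find_wildcard_py := by
  intro topic _hdom hD
  unfold D_find_wildcard_py at hD
  have hdl : DLp topic.toList := pvDDLp topic.toList hD.1 hD.2
  have hn : 1 ≤ topic.toList.length := List.length_pos_iff.mpr hdl.1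
  have hA : find_wildcard_py topic = (((topic.toList.length - 1 : Nat) : Int), 1) := by
    unfold find_wildcard_py
    exact pvRunA topic.toList hdl (topic.toList.length + 2) 0 (by omega) (by omega)
      (fun a ha _ => absurd ha (by omega))
  have hB : find_wildcard_py_alt topic = (-1, -1) := by
    unfold find_wildcard_py_alt
    have h := pvRunB topic.toList hdl topic.toList.length 0 false (by omega) (by omega)
      (fun _ => fun a ha _ => absurd ha (by omega)) (fun h => by simp at h)
    simpa using h
  rw [hA, hB]
  intro hEq
  simp at hEq
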